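-- pv_equiv track=rewrite | github.com/teru01/python_algorithms | agc39-a.py | f
-- ===== SOURCE A (Python) =====
-- def f(s):
--     n = len(s)
--     i = 0
--     ans = 0
--     while i < n-1:
--         c = 0
--         while i < n-1 and s[i] == s[i+1]:
--             c += 1
--             i += 1
--         ans += (c+1) // 2
--         i += 1
--     return ans
-- ===== SOURCE B (Python) =====
-- def f(s):
--     prev = None
--     ans = 0
--     for ch in s:
--         if ch == prev:
--             ans += 1
--             prev = None
--         else:
--             prev = ch
--     return ans
-- ===== Notes on version B (the rewrite author's own statement) =====
-- stated objective: simpler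
-- what changed: Replaced the index-based outer/inner while loops with run-length arithmetic by a single flat for-loop over the characters keeping only the last unpaired character in a state variable.
import Mathlib
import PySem

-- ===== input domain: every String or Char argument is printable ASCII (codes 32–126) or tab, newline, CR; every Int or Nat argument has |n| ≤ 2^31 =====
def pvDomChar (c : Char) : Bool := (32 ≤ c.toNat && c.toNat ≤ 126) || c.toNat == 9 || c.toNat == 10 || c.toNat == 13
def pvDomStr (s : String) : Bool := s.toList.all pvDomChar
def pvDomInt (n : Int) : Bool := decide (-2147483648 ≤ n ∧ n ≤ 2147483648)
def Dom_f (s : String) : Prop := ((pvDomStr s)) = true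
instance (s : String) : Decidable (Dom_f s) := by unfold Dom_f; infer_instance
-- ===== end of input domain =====

-- B is a simpler decomposition: one flat pass keeping the last unpaired character, instead of A's nested index-based while loops with per-run arithmetic.

-- ===== PORT A =====
-- inner while loop: 'while i < n-1 and s[i] == s[i+1]: c += 1; i += 1'; returns (c, i)
def fInner (l : List Char) (n i c : Int) : Int × Int :=
  if _h : i < n - 1 ∧ PySem.List.pyGet? l i = PySem.List.pyGet? l (i + 1) then
    fInner l n (i + 1) (c + 1)
  else (c, i)
termination_by (n - 1 - i).toNat
decreasing_by omega

-- the returned index never decreases (needed only for the outer loop's termination)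
theorem fInner_le (l : List Char) (n i c : Int) : i ≤ (fInner l n i c).2 := by
  unfold fInner
  split
  · have := fInner_le l n (i + 1) (c + 1); omega
  · simp
termination_by (n - 1 - i).toNat
decreasing_by omega

-- outer while loop: 'while i < n-1: …inner…; ans += (c+1)//2; i += 1'
def fOuter (l : List Char) (n i ans : Int) : Int :=
  if _h : i < n - 1 then
    let p := fInner l n i 0
    fOuter l n (p.2 + 1) (ans + PySem.Int.floordiv (p.1 + 1) 2)
  else ans
termination_by (n - 1 - i).toNat
decreasing_by
  have := fInner_le l n i 0
  omega

def f (s : String) : Int :=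
  fOuter s.toList (s.toList.length : Int) 0 0

-- ===== PORT B =====
-- one step of B's flat loop: state = (last unpaired char, answer so far)
def fStep (st : Option Char × Int) (ch : Char) : Option Char × Int :=
  match st.1 with
  | some p => if ch = p then (none, st.2 + 1) else (some ch, st.2)
  | none => (some ch, st.2)

def f_alt (s : String) : Int :=
  (s.toList.foldl fStep (none, 0)).2

-- ===== PRECONDITION & SPEC =====
def Spec_f (s : String) (out : Int) : Prop := out = f_alt s
instance (s : String) (out : Int) : Decidable (Spec_f s out) := by unfold Spec_f; infer_instance

-- ===== CLAIM (what is proved, stated in full; the proofs are below) =====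
def Claim_equal_f : Prop := ∀ (s : String), Dom_f s → Spec_f s (f s)

-- ===== LEMMAS AND PROOFS =====

-- reference function: pairs of equal adjacent characters, consumed greedily
def g : List Char → Int
  | [] => 0
  | [_] => 0
  | a :: b :: t => if a = b then 1 + g t else g (b :: t)

-- B equals g
theorem foldl_fStep (l : List Char) (a : Int) :
    (l.foldl fStep (none, a)).2 = a + g l ∧
      ∀ p : Char, (l.foldl fStep (some p, a)).2 = a + g (p :: l) := by
  induction l generalizing a with
  | nil => simp [g]
  | cons c t ih =>
    constructor
    · simpa [fStep] using (ih a).2 c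
    · intro p
      by_cases hpc : c = p
      · subst hpc
        simp only [List.foldl_cons, fStep, if_true]
        rw [(ih (a + 1)).1]
        simp only [g, if_true]
        ring
      · simp only [List.foldl_cons, fStep, if_neg hpc]
        rw [(ih a).2 c]
        simp only [g, if_neg (fun h : p = c => hpc h.symm)]

theorem f_alt_eq_g (s : String) : f_alt s = g s.toList := by
  simpa [f_alt] using (foldl_fStep s.toList 0).1

-- the run prefix taken by takeWhile (· = a) is a block of a's
theorem takeWhile_rep (a : Char) (xs : List Char) :
    xs.takeWhile (· = a) = List.replicate (xs.takeWhile (· = a)).length a :=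
  List.eq_replicate_of_mem (fun b hb => by
    have := List.mem_takeWhile_imp hb
    exact of_decide_eq_true this)

theorem dropWhile_head_ne (a : Char) (xs : List Char) :
    (xs.dropWhile (· = a)).head? ≠ some a := by
  induction xs with
  | nil => simp
  | cons b t ih =>
    by_cases hb : b = a
    · simpa [List.dropWhile_cons, hb] using ih
    · simp [hb]

-- inner-loop spec: starting inside the run at position i, fInner scans the rest of the run
theorem fInner_spec (l : List Char) (a : Char) (rest : List Char) (i c : Int)
    (hi : 0 ≤ i) (hd : l.drop i.toNat = a :: rest) :
    fInner l (l.length : Int) i c =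
      (c + ((rest.takeWhile (· = a)).length : Int),
       i + ((rest.takeWhile (· = a)).length : Int)) := by
  revert hi hd
  induction rest generalizing i c with
  | nil =>
    intro hi hd
    have hle : i.toNat < l.length := by
      by_contra hcon
      rw [List.drop_eq_nil_of_le (by omega)] at hd
      cases hd
    have hlen : l.length - i.toNat = 1 := by
      have := congrArg List.length hd
      simpa [List.length_drop] using this
    have hc : ¬(i < (l.length : Int) - 1 ∧
        PySem.List.pyGet? l i = PySem.List.pyGet? l (i + 1)) := by
      rintro ⟨h1, -⟩; omega
    rw [fInner, dif_neg hc]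
    simp
  | cons b rest' ih =>
    intro hi hd
    have hle : i.toNat < l.length := by
      by_contra hcon
      rw [List.drop_eq_nil_of_le (by omega)] at hd
      cases hd
    have hlen : l.length - i.toNat = rest'.length + 2 := by
      have := congrArg List.length hd
      simpa [List.length_drop] using this
    have hga : PySem.List.pyGet? l i = some a := by
      have hni : i = ((i.toNat : Nat) : Int) := by omega
      rw [hni, PySem.List.pyGet?_natCast]
      have h0 : (l.drop i.toNat)[(0 : Nat)]? = l[i.toNat + 0]? := List.getElem?_drop
      rw [hd] at h0
      simpa using h0.symm
    have hgb : PySem.List.pyGet? l (i + 1) = some b := by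
      have hni : i + 1 = ((i.toNat + 1 : Nat) : Int) := by omega
      rw [hni, PySem.List.pyGet?_natCast]
      have h0 : (l.drop i.toNat)[(1 : Nat)]? = l[i.toNat + 1]? := List.getElem?_drop
      rw [hd] at h0
      rw [← h0]
      rfl
    by_cases hba : b = a
    · subst hba
      rw [fInner, dif_pos ⟨by omega, by rw [hga, hgb]⟩]
      have hd' : l.drop (i + 1).toNat = b :: rest' := by
        have h1 : (i + 1).toNat = i.toNat + 1 := by omega
        rw [h1, ← List.drop_drop, hd]
        rfl
      rw [ih (i + 1) (c + 1) (by omega) hd']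
      simp only [List.takeWhile_cons, decide_eq_true_eq, if_true,
        List.length_cons, Prod.mk.injEq]
      push_cast
      omega
    · have hc : ¬(i < (l.length : Int) - 1 ∧
          PySem.List.pyGet? l i = PySem.List.pyGet? l (i + 1)) := by
        rintro ⟨-, heq⟩
        rw [hga, hgb] at heq
        exact hba (Option.some.inj heq).symm
      rw [fInner, dif_neg hc]
      have ht : (b :: rest').takeWhile (· = a) = [] := by
        simp [hba]
      rw [ht]
      simp

-- g on a run of m equal characters followed by t not starting with that character
theorem g_run (m : Nat) (a : Char) (t : List Char) (ht : t.head? ≠ some a) :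
    g (List.replicate m a ++ t) = ((m / 2 : Nat) : Int) + g t := by
  induction m using Nat.twoStepInduction with
  | zero => simp
  | one =>
    cases t with
    | nil => simp [g]
    | cons b t' =>
      have hab : a ≠ b := by
        simp only [List.head?_cons, ne_eq, Option.some.injEq] at ht
        exact fun h => ht h.symm
      simp [g, hab]
  | more m ih _ =>
    have h2 : ((m + 2) / 2 : Nat) = m / 2 + 1 := by omega
    simp only [List.replicate_succ, List.cons_append, g, if_true, ih, h2]
    push_cast
    ring

-- outer-loop spec
theorem fOuter_spec (l : List Char) (i ans : Int) (hi : 0 ≤ i) :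
    fOuter l (l.length : Int) i ans = ans + g (l.drop i.toNat) := by
  by_cases hlt : i < (l.length : Int) - 1
  · have h2 : i.toNat + 1 < l.length := by omega
    obtain ⟨a, rest, hd⟩ : ∃ a rest, l.drop i.toNat = a :: rest := by
      cases h : l.drop i.toNat with
      | nil =>
        exfalso
        have := congrArg List.length h
        simp [List.length_drop] at this
        omega
      | cons a rest => exact ⟨a, rest, rfl⟩
    set r := (rest.takeWhile (· = a)).length with hr
    have hdw : rest.drop r = rest.dropWhile (· = a) := by
      conv_lhs => rw [← List.takeWhile_append_dropWhile (p := (· = a)) (l := rest)]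
      exact List.drop_left
    have hsplit : a :: rest = List.replicate (r + 1) a ++ rest.drop r := by
      rw [hdw, List.replicate_succ, List.cons_append]
      congr 1
      conv_lhs => rw [← List.takeWhile_append_dropWhile (p := (· = a)) (l := rest)]
      congr 1
      exact takeWhile_rep a rest
    have hg : g (l.drop i.toNat) = (((r + 1) / 2 : Nat) : Int) + g (rest.drop r) := by
      rw [hd, hsplit]
      exact g_run (r + 1) a _ (by rw [hdw]; exact dropWhile_head_ne a rest)
    have hdrop : l.drop (i + (r : Int) + 1).toNat = rest.drop r := by
      have h1 : (i + (r : Int) + 1).toNat = i.toNat + (r + 1) := by omega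
      rw [h1, ← List.drop_drop, hd, List.drop_succ_cons]
    have hfd : PySem.Int.floordiv (0 + (r : Int) + 1) 2 = (((r + 1) / 2 : Nat) : Int) := by
      have h0 : (0 + (r : Int) + 1) = ((r + 1 : Nat) : Int) := by push_cast; ring
      rw [h0]
      exact_mod_cast PySem.Int.floordiv_natCast (r + 1) 2
    rw [fOuter, dif_pos hlt]
    simp only [fInner_spec l a rest i 0 hi hd]
    rw [hfd, fOuter_spec l (i + (r : Int) + 1) (ans + (((r + 1) / 2 : Nat) : Int)) (by omega),
      hdrop, hg]
    ring
  · rw [fOuter, dif_neg hlt]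
    have h1 : (l.drop i.toNat).length ≤ 1 := by
      rw [List.length_drop]; omega
    cases h : l.drop i.toNat with
    | nil => simp [g]
    | cons x t =>
      cases t with
      | nil => simp [g]
      | cons y u =>
        exfalso
        rw [h] at h1
        simp at h1
termination_by (l.length - i.toNat)
decreasing_by omega

-- ===== VERDICT (by name: the statement is the Claim_ definition above) =====
theorem f_spec : Claim_equal_f := by
  intro s _
  unfold Spec_f
  rw [f_alt_eq_g, f]
  simpa using (fOuter_spec s.toList 0 0 le_rfl)
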